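-- pv_equiv track=rewrite | github.com/Sana-7005/Campus-Connect | backend/backend/summarizer.py | fix_missing_subjects
-- ===== SOURCE A (Python) =====
-- def fix_missing_subjects(text: str, company: str) -> str:
--     sentences = text.split(". ")
--     fixed = []
--
--     for s in sentences:
--         if s.startswith("Offers ") or s.startswith("Provides "):
--             s = f"{company} {s}"
--         fixed.append(s)
--
--     return ". ".join(fixed)
-- ===== SOURCE B (Python) =====
-- def fix_missing_subjects(text: str, company: str) -> str:
--     # Single left-to-right character scan: no split/join, no intermediate list of
--     # sentences; tracks whether we are at a sentence start and copies chars through.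
--     out = []
--     i = 0
--     n = len(text)
--     at_start = True
--     while i < n:
--         if at_start and (text.startswith("Offers ", i) or text.startswith("Provides ", i)):
--             out.append(company)
--             out.append(" ")
--         if text.startswith(". ", i):
--             out.append(". ")
--             i += 2
--             at_start = True
--         else:
--             out.append(text[i])
--             i += 1
--             at_start = False
--     return "".join(out)
-- ===== Notes on version B (the rewrite author's own statement) =====
-- stated objective: alternative
-- what changed: Replaces split('. ')/loop-over-segments/join('. ') with a single left-to-right character scan that tracks whether it is at a sentence start and inserts the company name in place, building the output in one pass without materialising the sentence list.
import Mathlib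
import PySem

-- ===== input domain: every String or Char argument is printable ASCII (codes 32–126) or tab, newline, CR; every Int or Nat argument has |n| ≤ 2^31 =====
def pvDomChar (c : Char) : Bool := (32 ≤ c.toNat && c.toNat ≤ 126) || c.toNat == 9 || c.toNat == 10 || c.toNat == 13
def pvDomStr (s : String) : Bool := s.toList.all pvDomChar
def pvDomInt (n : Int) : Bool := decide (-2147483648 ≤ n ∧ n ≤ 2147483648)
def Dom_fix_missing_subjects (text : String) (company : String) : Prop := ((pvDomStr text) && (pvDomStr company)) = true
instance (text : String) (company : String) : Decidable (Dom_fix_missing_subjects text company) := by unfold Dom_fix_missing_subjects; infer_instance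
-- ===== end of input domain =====

-- B replaces A's split('. ')/loop/join with a single left-to-right character scan
-- that tracks sentence starts (objective: alternative; return value proved equal).


-- ===== PORT A =====
-- literal port: split on ". ", prepend company to segments starting with
-- "Offers "/"Provides " while appending to an accumulator, join with ". "
def fix_missing_subjects (text : String) (company : String) : String :=
  let sentences := PySem.Chars.splitOn text.toList ('.' :: ' ' :: [])
  let fixed := sentences.foldl (fun acc s =>
    acc ++ [if PySem.Chars.startswith s "Offers ".toList
               || PySem.Chars.startswith s "Provides ".toList
            then company.toList ++ ' ' :: s else s]) []
  String.ofList (PySem.Chars.join ('.' :: ' ' :: []) fixed)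

-- ===== PORT B =====
-- one-pass char scan; atStart = "at a sentence start" (start of string or just after ". ")
def pvScanB (company : List Char) (atStart : Bool) (s : List Char) : List Char :=
  match s with
  | [] => []
  | c :: rest =>
    let pre := if atStart && (PySem.Chars.startswith s "Offers ".toList
                              || PySem.Chars.startswith s "Provides ".toList)
               then company ++ [' '] else []
    if PySem.Chars.startswith s ('.' :: ' ' :: []) then
      pre ++ '.' :: ' ' :: pvScanB company true (rest.drop 1)
    else
      pre ++ c :: pvScanB company false rest
termination_by s.length
decreasing_by all_goals simp

def fix_missing_subjects_alt (text : String) (company : String) : String :=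
  String.ofList (pvScanB company.toList true text.toList)

-- ===== PRECONDITION & SPEC =====
def Spec_fix_missing_subjects (text : String) (company : String) (out : String) : Prop := out = fix_missing_subjects_alt text company
instance (text : String) (company : String) (out : String) : Decidable (Spec_fix_missing_subjects text company out) := by unfold Spec_fix_missing_subjects; infer_instance

-- ===== CLAIM (what is proved, stated in full; the proofs are below) =====
def Claim_equal_fix_missing_subjects : Prop := ∀ (text : String) (company : String), Dom_fix_missing_subjects text company → Spec_fix_missing_subjects text company (fix_missing_subjects text company)

-- ===== LEMMAS AND PROOFS =====

-- reference recursive form of Python's split(". ")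
def pvSplit : List Char → List (List Char)
  | [] => [[]]
  | c :: rest =>
    if List.isPrefixOf ('.' :: ' ' :: []) (c :: rest) then
      [] :: pvSplit (rest.drop 1)
    else
      List.modifyHead (c :: ·) (pvSplit rest)
termination_by l => l.length
decreasing_by all_goals simp

-- A's per-sentence fix
def pvF (company : List Char) (s : List Char) : List Char :=
  if PySem.Chars.startswith s "Offers ".toList
     || PySem.Chars.startswith s "Provides ".toList
  then company ++ ' ' :: s else s

theorem pvSplit_ne_nil (l : List Char) : pvSplit l ≠ [] := by
  induction l using pvSplit.induct with
  | case1 => simp [pvSplit]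
  | case2 c rest h ih => simp [pvSplit, h]
  | case3 c rest h ih =>
    simp only [pvSplit, if_neg h]
    cases hs : pvSplit rest with
    | nil => exact absurd hs ih
    | cons a t => simp

theorem pv_go_eq (fuel : Nat) : ∀ (l cur : List Char) (acc : List (List Char)),
    l.length ≤ fuel →
    PySem.Chars.splitOn.go ('.' :: ' ' :: []) fuel l cur acc
      = acc.reverse ++ List.modifyHead (cur.reverse ++ ·) (pvSplit l) := by
  induction fuel with
  | zero =>
    intro l cur acc h
    have : l = [] := List.eq_nil_of_length_eq_zero (Nat.le_zero.mp h)
    subst this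
    simp [PySem.Chars.splitOn.go, pvSplit]
  | succ fuel ih =>
    intro l cur acc h
    match l with
    | [] => simp [PySem.Chars.splitOn.go, pvSplit]
    | c :: rest =>
      rw [PySem.Chars.splitOn.go]
      by_cases hp : List.isPrefixOf ('.' :: ' ' :: []) (c :: rest)
      · simp only [hp, if_true]
        rw [show (('.' :: ' ' :: []) : List Char).length = 2 from rfl]
        have hlen : (List.drop 2 (c :: rest)).length ≤ fuel := by
          simp at h ⊢; omega
        rw [ih _ _ _ hlen]
        have hdrop : List.drop 2 (c :: rest) = rest.drop 1 := by simp
        rw [hdrop]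
        simp only [pvSplit, if_pos hp]
        cases hs : pvSplit (rest.drop 1) with
        | nil => exact absurd hs (pvSplit_ne_nil _)
        | cons a t => simp
      · simp only [hp]
        have hlen : rest.length ≤ fuel := by simp at h; omega
        rw [ih _ _ _ hlen]
        simp only [pvSplit, if_neg hp]
        cases hs : pvSplit rest with
        | nil => exact absurd hs (pvSplit_ne_nil _)
        | cons a t => simp

theorem pv_splitOn_eq (l : List Char) :
    PySem.Chars.splitOn l ('.' :: ' ' :: []) = pvSplit l := by
  rw [PySem.Chars.splitOn, pv_go_eq (l.length + 1) l [] [] (by omega)]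
  cases hs : pvSplit l with
  | nil => exact absurd hs (pvSplit_ne_nil _)
  | cons a t => simp

-- head of pvSplit keeps exactly the prefixes (for '.'-free patterns) of the whole string
theorem pv_head_prefix (n : Nat) : ∀ (p l : List Char), l.length ≤ n → '.' ∉ p →
    List.isPrefixOf p ((pvSplit l).headD []) = List.isPrefixOf p l := by
  induction n with
  | zero =>
    intro p l h _
    have : l = [] := List.eq_nil_of_length_eq_zero (Nat.le_zero.mp h)
    subst this; simp [pvSplit]
  | succ n ih =>
    intro p l h hdot
    match l with
    | [] => simp [pvSplit]
    | c :: rest =>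
      by_cases hp : List.isPrefixOf ('.' :: ' ' :: []) (c :: rest)
      · have hc : c = '.' := by
          simp [List.isPrefixOf] at hp; exact hp.1.symm
        simp only [pvSplit, if_pos hp, List.headD_cons]
        match p with
        | [] => simp [List.isPrefixOf]
        | q :: ps =>
          have hq : q ≠ '.' := fun hq => hdot (hq ▸ List.mem_cons_self)
          simp [List.isPrefixOf, hc, hq]
      · simp only [pvSplit, if_neg hp]
        cases hs : pvSplit rest with
        | nil => exact absurd hs (pvSplit_ne_nil _)
        | cons a t =>
          simp only [List.modifyHead_cons, List.headD_cons]
          match p with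
          | [] => simp [List.isPrefixOf]
          | q :: ps =>
            have hdot' : '.' ∉ ps := fun hm => hdot (List.mem_cons_of_mem _ hm)
            have hlen : rest.length ≤ n := by simp at h; omega
            have := ih ps rest hlen hdot'
            rw [hs] at this
            simp only [List.headD_cons] at this
            simp [List.isPrefixOf_cons₂, this]

theorem pv_join_head_append (a x : List Char) (X : List (List Char)) :
    PySem.Chars.join ('.' :: ' ' :: []) ((a ++ x) :: X)
      = a ++ PySem.Chars.join ('.' :: ' ' :: []) (x :: X) := by
  cases X with
  | nil => simp [PySem.Chars.join_singleton]
  | cons b t => simp [PySem.Chars.join_cons_cons]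

-- main loop invariant: the scan equals A's join of fixed segments; the head segment
-- is fixed iff the scan is in the atStart state
theorem pv_scan_eq (company : List Char) (n : Nat) : ∀ (l : List Char), l.length ≤ n →
    ∀ (b : Bool) (h : List Char) (t : List (List Char)), pvSplit l = h :: t →
    pvScanB company b l
      = PySem.Chars.join ('.' :: ' ' :: [])
          ((if b then pvF company h else h) :: t.map (pvF company)) := by
  induction n with
  | zero =>
    intro l hl b h t hsp
    have : l = [] := List.eq_nil_of_length_eq_zero (Nat.le_zero.mp hl)
    subst this
    simp [pvSplit] at hsp
    obtain ⟨h1, h2⟩ := hsp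
    subst h1; subst h2
    simp [pvScanB, pvF, PySem.Chars.startswith, PySem.Chars.join_singleton]
  | succ n ih =>
    intro l hl b h t hsp
    match l with
    | [] =>
      simp [pvSplit] at hsp
      obtain ⟨h1, h2⟩ := hsp
      subst h1; subst h2
      simp [pvScanB, pvF, PySem.Chars.startswith, PySem.Chars.join_singleton]
    | c :: rest =>
      by_cases hp : List.isPrefixOf ('.' :: ' ' :: []) (c :: rest)
      · -- at a ". " : empty segment, no fix possible
        have hc : c = '.' := by
          simp [List.isPrefixOf] at hp; exact hp.1.symm
        simp only [pvSplit, if_pos hp] at hsp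
        cases hs : pvSplit (rest.drop 1) with
        | nil => exact absurd hs (pvSplit_ne_nil _)
        | cons h' t' =>
          rw [hs] at hsp
          obtain ⟨h1, h2⟩ := List.cons.injEq .. ▸ hsp
          have hno : ("Offers ".toList.isPrefixOf (c :: rest)
              || "Provides ".toList.isPrefixOf (c :: rest)) = false := by
            subst hc; simp [List.isPrefixOf]
          have hlen : (rest.drop 1).length ≤ n := by simp at hl ⊢; omega
          have hrec := ih (rest.drop 1) hlen true h' t' hs
          have hF : pvF company [] = [] := by
            simp [pvF, PySem.Chars.startswith]
          rw [pvScanB]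
          simp only [PySem.Chars.startswith] at hp ⊢
          simp only [hno, hp, Bool.and_false, Bool.false_eq_true, if_false,
            if_true, List.nil_append]
          rw [hrec, ← h1, ← h2]
          cases b <;>
            simp [hF, PySem.Chars.join_cons_cons]
      · -- inside a segment
        simp only [pvSplit, if_neg hp] at hsp
        cases hs : pvSplit rest with
        | nil => exact absurd hs (pvSplit_ne_nil _)
        | cons h' t' =>
          rw [hs] at hsp
          simp only [List.modifyHead_cons] at hsp
          obtain ⟨h1, h2⟩ := List.cons.injEq .. ▸ hsp
          have hlen : rest.length ≤ n := by simp at hl; omega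
          have hrec := ih rest hlen false h' t' hs
          have hj2 := pv_join_head_append [c] h' (t'.map (pvF company))
          simp only [List.singleton_append] at hj2
          rw [pvScanB]
          simp only [PySem.Chars.startswith] at hp ⊢
          simp only [hp]
          rw [hrec, ← h1, ← h2]
          cases b with
          | false =>
            simp only [Bool.false_and, Bool.false_eq_true, if_false,
              List.nil_append]
            exact hj2.symm
          | true =>
            -- the startswith test on the rest of the text equals the test on the segment
            have hhead : ∀ (p : List Char), '.' ∉ p →
                List.isPrefixOf p (c :: h') = List.isPrefixOf p (c :: rest) := by
              intro p hdp
              have := pv_head_prefix (c :: rest).length p (c :: rest) le_rfl hdp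
              rw [pvSplit, if_neg hp, hs] at this
              simpa using this
            have hO : List.isPrefixOf "Offers ".toList (c :: h')
                = List.isPrefixOf "Offers ".toList (c :: rest) :=
              hhead _ (by decide)
            have hP : List.isPrefixOf "Provides ".toList (c :: h')
                = List.isPrefixOf "Provides ".toList (c :: rest) :=
              hhead _ (by decide)
            simp only [Bool.true_and, Bool.false_eq_true, if_false, if_true,
              pvF, PySem.Chars.startswith, hO, hP]
            by_cases hcond : ("Offers ".toList.isPrefixOf (c :: rest)
                || "Provides ".toList.isPrefixOf (c :: rest)) = true
            · simp only [hcond, if_true]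
              have hj1 := pv_join_head_append (company ++ [' ']) (c :: h')
                (t'.map (pvF company))
              rw [show company ++ ' ' :: c :: h'
                    = (company ++ [' ']) ++ (c :: h') by simp, hj1, hj2]
            · simp only [hcond, Bool.false_eq_true, if_false, List.nil_append]
              exact hj2.symm

theorem pv_foldl_append (g : List Char → List Char) :
    ∀ (l : List (List Char)) (init : List (List Char)),
    List.foldl (fun acc s => acc ++ [g s]) init l = init ++ l.map g := by
  intro l
  induction l with
  | nil => simp
  | cons a t ih => intro init; simp [List.foldl_cons, ih, List.append_assoc]

-- ===== VERDICT (by name: the statement is the Claim_ definition above) =====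
theorem fix_missing_subjects_spec : Claim_equal_fix_missing_subjects := by
  intro text company _
  unfold Spec_fix_missing_subjects fix_missing_subjects fix_missing_subjects_alt
  dsimp only
  rw [pv_splitOn_eq, pv_foldl_append]
  cases hs : pvSplit text.toList with
  | nil => exact absurd hs (pvSplit_ne_nil _)
  | cons h t =>
    rw [pv_scan_eq company.toList text.toList.length text.toList le_rfl true h t hs]
    have hfun : pvF company.toList = (fun s =>
        if (PySem.Chars.startswith s "Offers ".toList
            || PySem.Chars.startswith s "Provides ".toList) = true
        then company.toList ++ ' ' :: s else s) := by
      funext s; rfl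
    rw [hfun]
    simp
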